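-- pv_equiv track=rewrite | github.com/hunnieej/SphericalVAR | tools/probe_head_classification.py | resolve_prompt_seeds
-- ===== SOURCE A (Python) =====
-- DEFAULT_SEEDS = [1234, 5536, 8650, 9902, 0]
--
-- def resolve_prompt_seeds(num_prompts: int, base_seed: int):
--     seeds = []
--     for idx in range(num_prompts):
--         if idx < len(DEFAULT_SEEDS):
--             seeds.append(DEFAULT_SEEDS[idx])
--         else:
--             seeds.append(base_seed + idx)
--     return seeds
-- ===== SOURCE B (Python) =====
-- DEFAULT_SEEDS = [1234, 5536, 8650, 9902, 0]
--
-- def resolve_prompt_seeds(num_prompts: int, base_seed: int):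
--     prefix = DEFAULT_SEEDS[:max(num_prompts, 0)]
--     tail = [base_seed + idx for idx in range(len(DEFAULT_SEEDS), num_prompts)]
--     return prefix + tail
-- ===== Notes on version B (the rewrite author's own statement) =====
-- stated objective: simpler
-- what changed: Replaces the per-index loop with a branch inside by a clamped slice of DEFAULT_SEEDS concatenated with a comprehension over the overflow range, so no element-wise branching remains.
import Mathlib
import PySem

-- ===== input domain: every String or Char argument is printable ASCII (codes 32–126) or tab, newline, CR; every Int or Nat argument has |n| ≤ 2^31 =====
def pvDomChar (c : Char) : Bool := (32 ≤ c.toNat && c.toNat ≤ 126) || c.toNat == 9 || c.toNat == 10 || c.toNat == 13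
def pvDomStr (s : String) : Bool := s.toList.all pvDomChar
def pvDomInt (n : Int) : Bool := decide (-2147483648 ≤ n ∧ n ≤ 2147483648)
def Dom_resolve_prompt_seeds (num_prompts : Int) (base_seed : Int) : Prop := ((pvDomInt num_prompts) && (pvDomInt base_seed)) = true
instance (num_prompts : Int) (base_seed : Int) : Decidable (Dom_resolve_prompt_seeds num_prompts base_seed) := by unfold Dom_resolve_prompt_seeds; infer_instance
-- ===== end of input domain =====

-- B replaces A's per-index loop with a clamped slice of DEFAULT_SEEDS plus a comprehension over the overflow range (simpler).

def DEFAULT_SEEDS : List Int := [1234, 5536, 8650, 9902, 0]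

-- ===== PORT A =====
-- loop over range(num_prompts), appending per index; DEFAULT_SEEDS[idx] is in range when 0 ≤ idx < 5, so pyGetD's default is never reached
def resolve_prompt_seeds (num_prompts : Int) (base_seed : Int) : List Int :=
  (PySem.List.pyRange 0 num_prompts 1).foldl
    (fun seeds idx =>
      if idx < (DEFAULT_SEEDS.length : Int) then
        seeds ++ [PySem.List.pyGetD DEFAULT_SEEDS idx 0]
      else
        seeds ++ [base_seed + idx])
    []

-- ===== PORT B =====
def resolve_prompt_seeds_alt (num_prompts : Int) (base_seed : Int) : List Int :=
  PySem.List.slice DEFAULT_SEEDS none (some (max num_prompts 0)) ++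
    (PySem.List.pyRange (DEFAULT_SEEDS.length : Int) num_prompts 1).map (fun idx => base_seed + idx)

-- ===== PRECONDITION & SPEC =====
def Spec_resolve_prompt_seeds (num_prompts : Int) (base_seed : Int) (out : List Int) : Prop := out = resolve_prompt_seeds_alt num_prompts base_seed
instance (num_prompts : Int) (base_seed : Int) (out : List Int) : Decidable (Spec_resolve_prompt_seeds num_prompts base_seed out) := by unfold Spec_resolve_prompt_seeds; infer_instance

-- ===== CLAIM (what is proved, stated in full; the proofs are below) =====
def Claim_equal_resolve_prompt_seeds : Prop := ∀ (num_prompts : Int) (base_seed : Int), Dom_resolve_prompt_seeds num_prompts base_seed → Spec_resolve_prompt_seeds num_prompts base_seed (resolve_prompt_seeds num_prompts base_seed)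

-- ===== LEMMAS AND PROOFS =====

-- A's foldl-append loop is a map over the range
theorem resolveA_eq_map (n b : Int) :
    resolve_prompt_seeds n b =
      (PySem.List.pyRange 0 n 1).map
        (fun idx => if idx < (DEFAULT_SEEDS.length : Int)
                    then PySem.List.pyGetD DEFAULT_SEEDS idx 0 else b + idx) := by
  unfold resolve_prompt_seeds
  rw [show (fun (seeds : List Int) idx =>
        if idx < (DEFAULT_SEEDS.length : Int) then
          seeds ++ [PySem.List.pyGetD DEFAULT_SEEDS idx 0]
        else seeds ++ [b + idx])
      = (fun seeds idx => seeds ++ [if idx < (DEFAULT_SEEDS.length : Int)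
          then PySem.List.pyGetD DEFAULT_SEEDS idx 0 else b + idx]) from by
        funext seeds idx; split_ifs <;> rfl]
  rw [PySem.List.foldl_append_eq_flatMap, ← List.map_eq_flatMap]
  simp

theorem pyRange_split (a b c : Int) (hab : a ≤ b) (hbc : b ≤ c) :
    PySem.List.pyRange a c 1 = PySem.List.pyRange a b 1 ++ PySem.List.pyRange b c 1 := by
  have h : c = b + ((c - b).toNat : Int) := by omega
  rw [h]
  generalize (c - b).toNat = m
  clear h hbc
  induction m with
  | zero =>
      simp [PySem.List.pyRange_one_eq_nil (le_refl b)]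
  | succ k ih =>
      have h1 : (b : Int) + ((k + 1 : Nat) : Int) = (b + (k : Nat)) + 1 := by push_cast; ring
      rw [h1, PySem.List.pyRange_one_succ_right (by omega),
          PySem.List.pyRange_one_succ_right (by omega), ih, List.append_assoc]

-- ===== VERDICT (by name: the statement is the Claim_ definition above) =====
theorem resolve_prompt_seeds_spec : Claim_equal_resolve_prompt_seeds := by
  intro n b _
  show resolve_prompt_seeds n b = resolve_prompt_seeds_alt n b
  rw [resolveA_eq_map]
  unfold resolve_prompt_seeds_alt
  by_cases hn : n ≤ 5
  · -- no overflow tail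
    by_cases hn0 : n ≤ 0
    · rw [PySem.List.pyRange_one_eq_nil (by omega), PySem.List.pyRange_one_eq_nil (by omega)]
      have : max n 0 = 0 := by omega
      rw [this, PySem.List.slice_to DEFAULT_SEEDS (le_refl (0:Int))]; simp
    · interval_cases n <;>
        simp [PySem.List.slice_to, PySem.List.pyRange_one_eq_nil,
          show PySem.List.pyRange 0 1 1 = [0] from by decide,
          show PySem.List.pyRange 0 2 1 = [0,1] from by decide,
          show PySem.List.pyRange 0 3 1 = [0,1,2] from by decide,
          show PySem.List.pyRange 0 4 1 = [0,1,2,3] from by decide,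
          show PySem.List.pyRange 0 5 1 = [0,1,2,3,4] from by decide,
          PySem.List.pyGetD, DEFAULT_SEEDS]
  · rw [not_le] at hn
    -- n > 5: split the range at 5
    have h5 : (DEFAULT_SEEDS.length : Int) = 5 := by decide
    rw [h5, pyRange_split 0 5 n (by omega) (by omega), List.map_append]
    congr 1
    · -- head: the five defaults
      rw [show PySem.List.pyRange 0 5 1 = [0,1,2,3,4] from by decide]
      have hmax : max n 0 = n := by omega
      rw [hmax, PySem.List.slice_to DEFAULT_SEEDS (show (0:Int) ≤ n by omega),
          List.take_of_length_le (by simp [DEFAULT_SEEDS]; omega)]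
      norm_num [PySem.List.pyGetD, PySem.List.pyIdx?, DEFAULT_SEEDS]
      decide
    · -- tail: every index ≥ 5 lands in the else branch
      apply List.map_congr_left
      intro idx hidx
      rw [PySem.List.mem_pyRange_one] at hidx
      rw [if_neg (by omega)]
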